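-- pv_equiv track=rewrite | github.com/ket0825/baekjoon_algorithm | retry/candy_game3085.py | count_consecutive_color_row
-- ===== SOURCE A (Python) =====
-- def count_consecutive_color_row(mat, index_checklist):
--     consecutive_color_count_list = []
--     for rownum in index_checklist:
--         consecutive_color_count = 0
--         cur_color = None
--         prev_color = None
--         for col in mat[rownum]:
--             cur_color = col
--             if cur_color != prev_color and prev_color != None:
--                 consecutive_color_count_list.append(consecutive_color_count)
--                 consecutive_color_count = 1
--                 prev_color = cur_color
--             else:
--                 prev_color = cur_color
--                 consecutive_color_count+=1
--         consecutive_color_count_list.append(consecutive_color_count)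
--     return consecutive_color_count_list
-- ===== SOURCE B (Python) =====
-- def count_consecutive_color_row(mat, index_checklist):
--     out = []
--     for rownum in index_checklist:
--         row = mat[rownum]
--         if not row:
--             out.append(0)
--         else:
--             while row:
--                 k = 1
--                 while k < len(row) and row[k] == row[0]:
--                     k += 1
--                 out.append(k)
--                 row = row[k:]
--     return out
-- ===== Notes on version B (the rewrite author's own statement) =====
-- stated objective: alternative
-- what changed: Replaces A's single-pass prev/counter state machine with greedy maximal-run extraction: repeatedly measure the run of the first element and slice it off, appending each run length directly (empty rows append 0); Pre_ excludes only out-of-range row indices, on which both programs raise IndexError.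
import Mathlib
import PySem

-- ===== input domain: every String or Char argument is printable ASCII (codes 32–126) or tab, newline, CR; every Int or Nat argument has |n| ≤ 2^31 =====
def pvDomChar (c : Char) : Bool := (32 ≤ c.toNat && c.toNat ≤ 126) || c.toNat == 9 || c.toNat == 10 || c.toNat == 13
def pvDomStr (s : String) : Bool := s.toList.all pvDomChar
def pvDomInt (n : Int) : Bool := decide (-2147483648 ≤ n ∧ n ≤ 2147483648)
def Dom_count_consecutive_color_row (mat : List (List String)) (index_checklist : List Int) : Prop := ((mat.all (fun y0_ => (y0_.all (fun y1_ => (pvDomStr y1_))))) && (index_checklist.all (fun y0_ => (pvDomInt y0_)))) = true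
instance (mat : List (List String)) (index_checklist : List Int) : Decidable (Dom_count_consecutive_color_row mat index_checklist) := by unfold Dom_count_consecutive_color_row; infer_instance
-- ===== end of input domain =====

-- B replaces A's prev/counter state machine by greedy maximal-run extraction (same cost, different decomposition).


-- ===== PORT A =====
-- the body of A's inner loop (one matrix cell), as a named step function
def pvAbody (st : List Int × Int × Option String) (col : String) : List Int × Int × Option String :=
  if some col ≠ st.2.2 ∧ st.2.2 ≠ none then
    (st.1 ++ [st.2.1], 1, some col)
  else
    (st.1, st.2.1 + 1, some col)

-- the body of A's outer loop: one row, threading the shared accumulator list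
def pvAstep (mat : List (List String)) (acc : List Int) (rownum : Int) : List Int :=
  match PySem.List.pyGet? mat rownum with
  | none => acc          -- Python raises IndexError here; excluded by Pre_
  | some row =>
    let s := row.foldl pvAbody (acc, 0, none)
    s.1 ++ [s.2.1]

def count_consecutive_color_row (mat : List (List String)) (index_checklist : List Int) : List Int :=
  index_checklist.foldl (pvAstep mat) []

-- ===== PORT B =====
-- B's 'while row:' loop: strip the maximal run of the head element, emit its length, recurse
def pvRunsB : List String → List Int
  | [] => []
  | c :: rest =>
    ((1 + (rest.takeWhile (fun x => x == c)).length : Nat) : Int) ::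
      pvRunsB (rest.drop (rest.takeWhile (fun x => x == c)).length)
termination_by l => l.length
decreasing_by simp [List.length_drop]

def pvBstep (mat : List (List String)) (out : List Int) (rownum : Int) : List Int :=
  match PySem.List.pyGet? mat rownum with
  | none => out          -- Python raises IndexError here; excluded by Pre_
  | some row =>
    if row.isEmpty then out ++ [0] else out ++ pvRunsB row

def count_consecutive_color_row_alt (mat : List (List String)) (index_checklist : List Int) : List Int :=
  index_checklist.foldl (pvBstep mat) []

-- ===== PRECONDITION & SPEC =====
-- Pre_ excludes exactly the inputs on which Python A raises IndexError: a row index outside [-len(mat), len(mat)).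
def Pre_count_consecutive_color_row (mat : List (List String)) (index_checklist : List Int) : Prop :=
  ∀ i ∈ index_checklist, PySem.Raise.InRange mat.length i
instance (mat : List (List String)) (index_checklist : List Int) : Decidable (Pre_count_consecutive_color_row mat index_checklist) := by unfold Pre_count_consecutive_color_row; infer_instance

def pvWitness_count_consecutive_color_row : List (List String) × List Int :=
  ([["a", "a", "b"], [], ["c"]], [0, 1, -1, 2])

def Spec_count_consecutive_color_row (mat : List (List String)) (index_checklist : List Int) (out : List Int) : Prop := out = count_consecutive_color_row_alt mat index_checklist
instance (mat : List (List String)) (index_checklist : List Int) (out : List Int) : Decidable (Spec_count_consecutive_color_row mat index_checklist out) := by unfold Spec_count_consecutive_color_row; infer_instance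

-- ===== CLAIM (what is proved, stated in full; the proofs are below) =====
def Claim_equal_count_consecutive_color_row : Prop := ∀ (mat : List (List String)) (index_checklist : List Int), Dom_count_consecutive_color_row mat index_checklist → Pre_count_consecutive_color_row mat index_checklist → Spec_count_consecutive_color_row mat index_checklist (count_consecutive_color_row mat index_checklist)

-- ===== LEMMAS AND PROOFS =====

theorem pvWitness_ok :
    Dom_count_consecutive_color_row pvWitness_count_consecutive_color_row.1 pvWitness_count_consecutive_color_row.2 ∧
    Pre_count_consecutive_color_row pvWitness_count_consecutive_color_row.1 pvWitness_count_consecutive_color_row.2 := by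
  constructor <;> decide

-- unfolding equations for the well-founded pvRunsB
theorem pvRunsB_nil : pvRunsB [] = ([] : List Int) := by rw [pvRunsB.eq_def]

theorem pvRunsB_cons (c : String) (rest : List String) :
    pvRunsB (c :: rest) =
      ((1 + (rest.takeWhile (fun x => x == c)).length : Nat) : Int) ::
        pvRunsB (rest.drop (rest.takeWhile (fun x => x == c)).length) := by
  rw [pvRunsB.eq_def]

-- A's inner fold, started after the first element has installed (cnt, some prev),
-- produces exactly the greedy run decomposition that pvRunsB computes.
theorem pvA_inner (rest : List String) : ∀ (acc : List Int) (cnt : Int) (prev : String),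
    (rest.foldl pvAbody (acc, cnt, some prev)).1 ++ [(rest.foldl pvAbody (acc, cnt, some prev)).2.1] =
    acc ++ (cnt + ((rest.takeWhile (fun x => x == prev)).length : Int)) ::
      pvRunsB (rest.drop (rest.takeWhile (fun x => x == prev)).length) := by
  induction rest with
  | nil => intro acc cnt prev; simp [pvRunsB_nil]
  | cons d tl ih =>
    intro acc cnt prev
    by_cases h : d = prev
    · subst h
      have hs : pvAbody (acc, cnt, some d) d = (acc, cnt + 1, some d) := by
        simp [pvAbody]
      have ht : List.takeWhile (fun x => x == d) (d :: tl) =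
          d :: List.takeWhile (fun x => x == d) tl := by
        simp
      rw [List.foldl_cons, hs, ih acc (cnt + 1) d, ht]
      simp only [List.length_cons, List.drop_succ_cons]
      congr 2
      push_cast
      ring
    · have hs : pvAbody (acc, cnt, some prev) d = (acc ++ [cnt], 1, some d) := by
        simp [pvAbody, h]
      have ht : List.takeWhile (fun x => x == prev) (d :: tl) = [] := by
        simp [h]
      rw [List.foldl_cons, hs, ih (acc ++ [cnt]) 1 d, ht]
      simp only [List.length_nil, List.drop_zero, Nat.cast_zero, add_zero]
      rw [pvRunsB_cons]
      push_cast
      simp [List.append_assoc]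

-- per-row equality of the two loop bodies
theorem pvStep_eq (mat : List (List String)) (acc : List Int) (rownum : Int) :
    pvAstep mat acc rownum = pvBstep mat acc rownum := by
  unfold pvAstep pvBstep
  cases hg : PySem.List.pyGet? mat rownum with
  | none => rfl
  | some row =>
    cases row with
    | nil => simp
    | cons c rest =>
      have hs : pvAbody (acc, 0, none) c = (acc, 1, some c) := by
        simp [pvAbody]
      simp only [List.foldl_cons, hs, List.isEmpty_cons, Bool.false_eq_true, if_false]
      rw [pvA_inner rest acc 1 c, pvRunsB_cons]
      push_cast
      ring_nf

theorem pvFold_eq (mat : List (List String)) (ic : List Int) : ∀ (acc : List Int),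
    ic.foldl (pvAstep mat) acc = ic.foldl (pvBstep mat) acc := by
  induction ic with
  | nil => intro acc; rfl
  | cons i tl ih => intro acc; simp only [List.foldl_cons, pvStep_eq, ih]

-- ===== VERDICT (by name: the statement is the Claim_ definition above) =====
theorem count_consecutive_color_row_spec : Claim_equal_count_consecutive_color_row := by
  intro mat ic _ _
  unfold Spec_count_consecutive_color_row count_consecutive_color_row count_consecutive_color_row_alt
  exact pvFold_eq mat ic []
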